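-- pv_equiv track=rewrite | github.com/andrewschultz/miscellany | glom.py | glom_modification_of
-- ===== SOURCE A (Python) =====
-- def glom_modification_of(my_idea, alphabetize_this):
--     replace_no_space = ",.!':;"
--     my_idea = my_idea.lower()
--     for r in replace_no_space:
--         my_idea = my_idea.replace(r, '')
--     my_idea = my_idea.replace('-', ' ')
--     word_array = my_idea.split(' ')
--     if alphabetize_this:
--         word_array = sorted(word_array)
--     return ' '.join(word_array)
-- ===== SOURCE B (Python) =====
-- def glom_modification_of(my_idea, alphabetize_this):
--     skip = ",.!':;"
--     cleaned = []
--     for ch in my_idea.lower():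
--         if ch in skip:
--             continue
--         cleaned.append(' ' if ch == '-' else ch)
--     words = ''.join(cleaned).split(' ')
--     if alphabetize_this:
--         words = sorted(words)
--     return ' '.join(words)
-- ===== Notes on version B (the rewrite author's own statement) =====
-- stated objective: alternative
-- what changed: Replaces seven separate full-string replace() scans with a single character-by-character pass that drops punctuation and maps '-' to space while building the cleaned string once; asymptotically one traversal instead of seven, though CPython's C-level replace makes A faster in wall-clock terms.
import Mathlib
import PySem

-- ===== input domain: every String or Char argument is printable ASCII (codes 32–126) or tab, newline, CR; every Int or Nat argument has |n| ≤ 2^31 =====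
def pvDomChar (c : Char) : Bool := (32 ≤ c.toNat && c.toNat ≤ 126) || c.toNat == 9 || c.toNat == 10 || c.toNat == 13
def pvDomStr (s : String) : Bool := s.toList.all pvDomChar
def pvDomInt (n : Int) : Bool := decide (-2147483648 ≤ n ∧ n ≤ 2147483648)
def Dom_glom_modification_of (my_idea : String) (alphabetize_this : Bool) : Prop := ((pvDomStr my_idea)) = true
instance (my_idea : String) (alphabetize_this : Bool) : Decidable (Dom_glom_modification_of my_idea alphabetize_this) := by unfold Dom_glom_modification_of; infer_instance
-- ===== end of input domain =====

-- B replaces A's seven separate full-string replace scans by one character pass (drop punctuation,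
-- map '-' to space) before splitting; a different traversal, same return value.

-- ===== PORT A =====
def glom_modification_of (my_idea : String) (alphabetize_this : Bool) : String :=
  let replace_no_space := ",.!':;"
  let s1 := PySem.Str.lower my_idea
  let s2 := replace_no_space.toList.foldl
    (fun acc r => PySem.Str.replace acc (String.ofList [r]) "") s1
  let s3 := PySem.Str.replace s2 "-" " "
  let word_array := (PySem.Str.split? s3 " ").getD []   -- sep " " ≠ "", so split? is always some
  let word_array := if alphabetize_this then PySem.List.sorted word_array (fun w => w) else word_array
  PySem.Str.join " " word_array

-- ===== PORT B =====
-- one cleaning step per character: none = skipped, some c = kept (with '-' mapped to ' ')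
def pvCleanChar (c : Char) : Option Char :=
  if c ∈ [',', '.', '!', '\'', ':', ';'] then none
  else if c = '-' then some ' ' else some c

def glom_modification_of_alt (my_idea : String) (alphabetize_this : Bool) : String :=
  let cleaned : List Char := (PySem.Str.lower my_idea).toList.filterMap pvCleanChar
  let words : List String := (PySem.Chars.splitOn cleaned [' ']).map String.ofList
  let words := if alphabetize_this then PySem.List.sorted words (fun w => w) else words
  PySem.Str.join " " words

-- ===== PRECONDITION & SPEC =====
def Spec_glom_modification_of (my_idea : String) (alphabetize_this : Bool) (out : String) : Prop := out = glom_modification_of_alt my_idea alphabetize_this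
instance (my_idea : String) (alphabetize_this : Bool) (out : String) : Decidable (Spec_glom_modification_of my_idea alphabetize_this out) := by unfold Spec_glom_modification_of; infer_instance

-- ===== CLAIM (what is proved, stated in full; the proofs are below) =====
def Claim_equal_glom_modification_of : Prop := ∀ (my_idea : String) (alphabetize_this : Bool), Dom_glom_modification_of my_idea alphabetize_this → Spec_glom_modification_of my_idea alphabetize_this (glom_modification_of my_idea alphabetize_this)

-- ===== LEMMAS AND PROOFS =====

-- replace.go with a single-char pattern, on enough fuel, substitutes char by char
theorem pv_replace_go_single (a : Char) (new : List Char) :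
    ∀ (l : List Char) (fuel : Nat) (acc : List Char), l.length ≤ fuel →
      PySem.Chars.replace.go [a] new fuel l acc
        = acc.reverse ++ l.flatMap (fun c => if c = a then new else [c]) := by
  intro l
  induction l with
  | nil =>
      intro fuel acc _
      cases fuel <;> simp [PySem.Chars.replace.go]
  | cons c t ih =>
      intro fuel acc h
      cases fuel with
      | zero => simp at h
      | succ n =>
        have ht : t.length ≤ n := by simpa using h
        by_cases hc : c = a
        · subst hc
          have hpre : List.isPrefixOf [c] (c :: t) = true := by
            simp [List.isPrefixOf]
          rw [PySem.Chars.replace.go, if_pos hpre]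
          simp only [List.length_cons, List.length_nil, List.drop_succ_cons, List.drop_zero]
          rw [ih n (new.reverse ++ acc) ht]
          simp
        · have hpre : List.isPrefixOf [a] (c :: t) = false := by
            simp [List.isPrefixOf]; intro h'; exact (hc h'.symm).elim
          rw [PySem.Chars.replace.go]
          rw [if_neg (by simp [hpre])]
          rw [ih n (c :: acc) ht]
          simp [hc]

theorem pv_replace_single (a : Char) (new s : List Char) :
    PySem.Chars.replace s [a] new = s.flatMap (fun c => if c = a then new else [c]) := by
  simp [PySem.Chars.replace, pv_replace_go_single a new s s.length [] (le_refl _)]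

theorem pv_replace_del (a : Char) (s : List Char) :
    PySem.Chars.replace s [a] [] = s.filterMap (fun c => if c = a then none else some c) := by
  rw [pv_replace_single]
  induction s with
  | nil => rfl
  | cons c t ih => by_cases h : c = a <;> simp [h, ih]

theorem pv_replace_map (a b : Char) (s : List Char) :
    PySem.Chars.replace s [a] [b] = s.map (fun c => if c = a then b else c) := by
  rw [pv_replace_single]
  induction s with
  | nil => rfl
  | cons c t ih => by_cases h : c = a <;> simp [h, ih]

-- the chain of A's seven replaces equals B's single filterMap pass
theorem pv_chain (cs : List Char) :
    PySem.Chars.replace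
      ((",.!':;".toList).foldl (fun acc r =>
        PySem.Chars.replace acc [r] []) cs) ['-'] [' ']
      = cs.filterMap pvCleanChar := by
  have hl : (",.!':;".toList) = [',', '.', '!', '\'', ':', ';'] := by decide
  rw [hl]
  simp only [List.foldl_cons, List.foldl_nil, pv_replace_del, pv_replace_map,
    List.filterMap_filterMap, List.map_filterMap]
  congr 1
  funext c
  by_cases h : c ∈ [',', '.', '!', '\'', ':', ';']
  · simp only [List.mem_cons, List.not_mem_nil, or_false] at h
    rcases h with rfl | rfl | rfl | rfl | rfl | rfl <;> rfl
  · simp only [List.mem_cons, List.not_mem_nil, or_false, not_or] at h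
    obtain ⟨h1, h2, h3, h4, h5, h6⟩ := h
    by_cases hd : c = '-' <;> simp [pvCleanChar, h1, h2, h3, h4, h5, h6, hd]

-- ===== VERDICT (by name: the statement is the Claim_ definition above) =====
theorem glom_modification_of_spec : Claim_equal_glom_modification_of := by
  intro my_idea alphabetize_this _
  unfold Spec_glom_modification_of glom_modification_of glom_modification_of_alt
  have hs2 : ∀ (punct : List Char) (s : String),
      (punct.foldl (fun acc r => PySem.Str.replace acc (String.ofList [r]) "") s).toList
        = punct.foldl (fun acc r => PySem.Chars.replace acc [r] []) s.toList := by
    intro punct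
    induction punct with
    | nil => intro s; rfl
    | cons p t ih =>
        intro s
        simp only [List.foldl_cons]
        rw [ih]
        congr 1
        rw [PySem.Str.toList_replace]
        simp
  have h3 : (PySem.Str.replace
      ((",.!':;".toList).foldl (fun acc r => PySem.Str.replace acc (String.ofList [r]) "")
        (PySem.Str.lower my_idea)) "-" " ").toList
      = (PySem.Str.lower my_idea).toList.filterMap pvCleanChar := by
    rw [PySem.Str.toList_replace, hs2]
    have : ("-".toList) = ['-'] := by decide
    rw [this]
    have : (" ".toList) = [' '] := by decide
    rw [this]
    exact pv_chain _
  simp only [PySem.Str.split?]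
  have hsep : PySem.Chars.split? (PySem.Str.replace
      ((",.!':;".toList).foldl (fun acc r => PySem.Str.replace acc (String.ofList [r]) "")
        (PySem.Str.lower my_idea)) "-" " ").toList (" ".toList)
      = some (PySem.Chars.splitOn ((PySem.Str.lower my_idea).toList.filterMap pvCleanChar) [' ']) := by
    rw [h3]
    simp [PySem.Chars.split?]
  rw [hsep]
  simp
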